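-- pv_equiv track=rewrite | github.com/yeon-hong/coding-test | 프로그래머스/1/133499. 옹알이 （2）/옹알이 （2）.py | can_pronounce
-- ===== SOURCE A (Python) =====
-- def can_pronounce(word):
--     sounds = ["aya", "ye", "woo", "ma"]
--     prev = ''
--     while word:
--         matched = False
--         for sound in sounds:
--             if word.startswith(sound) and sound != prev:
--                 word = word[len(sound):]
--                 prev = sound
--                 matched = True
--
--         if not matched:
--             return False
--     return True
-- ===== SOURCE B (Python) =====
-- # Tokenize-then-validate: a first-char dispatch table tokenizes the whole word
-- # (index scan, no string slicing), then a separate pass rejects adjacent repeats.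
-- _FIRST = {'a': 'aya', 'y': 'ye', 'w': 'woo', 'm': 'ma'}
--
-- def can_pronounce(word):
--     tokens = []
--     i = 0
--     n = len(word)
--     while i < n:
--         s = _FIRST.get(word[i])
--         if s is None or not word.startswith(s, i):
--             return False
--         tokens.append(s)
--         i += len(s)
--     return all(a != b for a, b in zip(tokens, tokens[1:]))
-- ===== Notes on version B (the rewrite author's own statement) =====
-- stated objective: alternative
-- what changed: A's consume-while-scanning while loop (repeated string slicing with a prev variable checked inside the matching pass) is replaced by a tokenize-then-validate decomposition: a first-char dispatch table tokenizes the word with an index (no slicing), then a separate pass rejects adjacent repeated tokens.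
import Mathlib
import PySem

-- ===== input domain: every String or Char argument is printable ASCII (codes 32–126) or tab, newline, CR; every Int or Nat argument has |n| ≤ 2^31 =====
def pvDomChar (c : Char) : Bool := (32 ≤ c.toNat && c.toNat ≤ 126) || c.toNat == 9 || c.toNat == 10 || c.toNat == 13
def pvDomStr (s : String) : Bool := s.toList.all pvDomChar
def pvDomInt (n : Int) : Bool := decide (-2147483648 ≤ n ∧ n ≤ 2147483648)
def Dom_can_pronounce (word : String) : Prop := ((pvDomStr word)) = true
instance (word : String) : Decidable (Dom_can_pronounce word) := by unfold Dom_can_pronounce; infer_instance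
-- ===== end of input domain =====

-- B replaces A's slice-and-track-prev while loop by a tokenize-then-validate decomposition
-- (first-char dispatch tokenizer over an index, then a separate adjacent-repeat pass).


-- ===== PORT A =====
-- sounds = ["aya", "ye", "woo", "ma"]
def pvSounds : List (List Char) := [['a','y','a'], ['y','e'], ['w','o','o'], ['m','a']]

-- body of A's `for sound in sounds` loop: state = (word, prev, matched)
def pvStepA (st : List Char × List Char × Bool) (s : List Char) : List Char × List Char × Bool :=
  if s.isPrefixOf st.1 ∧ s ≠ st.2.1 then (st.1.drop s.length, s, true) else st

-- step preserves/never shrinks-illegally: used for termination of the while loop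
theorem pvFoldA_le (L : List (List Char)) (st : List Char × List Char × Bool) :
    (L.foldl pvStepA st).1.length ≤ st.1.length := by
  induction L generalizing st with
  | nil => exact Nat.le_refl _
  | cons s L ih =>
    refine Nat.le_trans (ih (pvStepA st s)) ?_
    unfold pvStepA
    split
    · exact Nat.le_trans (List.length_drop ▸ Nat.sub_le _ _) (Nat.le_refl _)
    · exact Nat.le_refl _

theorem pvFoldA_lt (L : List (List Char)) (hL : ∀ s ∈ L, s ≠ []) (w p : List Char)
    (hm : (L.foldl pvStepA (w, p, false)).2.2 = true) :
    (L.foldl pvStepA (w, p, false)).1.length < w.length := by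
  induction L generalizing w p with
  | nil => simp at hm
  | cons s L ih =>
    by_cases hc : s <+: w ∧ s ≠ p
    · have hfold : List.foldl pvStepA (w, p, false) (s :: L)
          = List.foldl pvStepA (w.drop s.length, s, true) L := by
        simp [List.foldl, pvStepA, hc]
      rw [hfold] at hm ⊢
      have h1 : (List.foldl pvStepA (w.drop s.length, s, true) L).1.length
          ≤ (w.drop s.length).length := pvFoldA_le L _
      have hs : s ≠ [] := hL s (by simp)
      have hslen : 1 ≤ s.length := by
        cases s with
        | nil => exact absurd rfl hs
        | cons a t => simp
      have hpre : s.length ≤ w.length := hc.1.length_le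
      have : (w.drop s.length).length < w.length := by
        rw [List.length_drop]; omega
      omega
    · have hfold : List.foldl pvStepA (w, p, false) (s :: L)
          = List.foldl pvStepA (w, p, false) L := by
        simp [List.foldl, pvStepA, hc]
      rw [hfold] at hm ⊢
      exact ih (fun x hx => hL x (by simp [hx])) w p hm

-- A's while loop
def pvGoA (word prev : List Char) : Bool :=
  if word = [] then true
  else
    let st := pvSounds.foldl pvStepA (word, prev, false)
    if hm : st.2.2 = true then pvGoA st.1 st.2.1 else false
termination_by word.length
decreasing_by
  exact pvFoldA_lt pvSounds (by decide) word prev hm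

def can_pronounce (word : String) : Bool := pvGoA word.toList []

-- ===== PORT B =====
-- _FIRST = {'a': 'aya', 'y': 'ye', 'w': 'woo', 'm': 'ma'}.get(word[i])
def pvFirstSound (c : Char) : Option (List Char) :=
  if c = 'a' then some ['a','y','a']
  else if c = 'y' then some ['y','e']
  else if c = 'w' then some ['w','o','o']
  else if c = 'm' then some ['m','a']
  else none

-- B's tokenizing while loop; the index i is represented by the remaining suffix,
-- and `i += len(s)` is `rest.drop (s.length - 1)` (exact: every dispatched s is nonempty).
def pvTokB : List Char → Option (List (List Char))
  | [] => some []
  | c :: rest =>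
    match pvFirstSound c with
    | none => none
    | some s =>
      if s.isPrefixOf (c :: rest) then
        (pvTokB (rest.drop (s.length - 1))).map (fun ts => s :: ts)
      else none
termination_by w => w.length
decreasing_by
  simp only [List.length_drop, List.length_cons]
  omega

-- all(a != b for a, b in zip(tokens, tokens[1:]))
def pvAdjOK (ts : List (List Char)) : Bool := (ts.zip ts.tail).all (fun p => p.1 != p.2)

def can_pronounce_alt (word : String) : Bool :=
  match pvTokB word.toList with
  | none => false
  | some ts => pvAdjOK ts

-- ===== PRECONDITION & SPEC =====
def Spec_can_pronounce (word : String) (out : Bool) : Prop := out = can_pronounce_alt word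
instance (word : String) (out : Bool) : Decidable (Spec_can_pronounce word out) := by unfold Spec_can_pronounce; infer_instance

-- ===== CLAIM (what is proved, stated in full; the proofs are below) =====
def Claim_equal_can_pronounce : Prop := ∀ (word : String), Dom_can_pronounce word → Spec_can_pronounce word (can_pronounce word)

-- ===== LEMMAS AND PROOFS =====

-- prev-aware adjacency check: chain prev (t :: ts) requires t ≠ prev
def pvChain (prev : List Char) : List (List Char) → Bool
  | [] => true
  | t :: ts => (t != prev) && pvChain t ts

-- B's tokenizer followed by the prev-aware check: the common denominator of A and B
def pvTokChain (w prev : List Char) : Bool :=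
  match pvTokB w with
  | none => false
  | some ts => pvChain prev ts

theorem pvFirstSound_mem {c : Char} {s : List Char} (h : pvFirstSound c = some s) :
    s ∈ pvSounds := by
  unfold pvFirstSound at h
  split_ifs at h <;> simp_all [pvSounds]

theorem pvSounds_ne_nil {s : List Char} (hs : s ∈ pvSounds) : s ≠ [] := by
  simp [pvSounds] at hs
  rcases hs with rfl | rfl | rfl | rfl <;> simp

-- one greedy strip of a matching, non-repeated sound commutes with tokenize-then-chain
theorem pvStripStep {s w prev : List Char} (hs : s ∈ pvSounds)
    (hp : s <+: w) (hne : s ≠ prev) :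
    pvTokChain w prev = pvTokChain (w.drop s.length) s := by
  obtain ⟨t, rfl⟩ := hp
  simp only [pvSounds, List.mem_cons, List.not_mem_nil, or_false] at hs
  rcases hs with rfl | rfl | rfl | rfl <;>
    · unfold pvTokChain
      rw [pvTokB.eq_def]
      cases h : pvTokB t with
      | none => simp [pvFirstSound, List.isPrefixOf, h]
      | some ts => simp [pvFirstSound, List.isPrefixOf, h, pvChain, hne]

-- if every matching sound equals prev, both sides fail
theorem pvDeadEnd {w prev : List Char} (hw : w ≠ [])
    (h : ∀ s ∈ pvSounds, s <+: w → s = prev) :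
    pvTokChain w prev = false := by
  cases w with
  | nil => exact absurd rfl hw
  | cons c r =>
    unfold pvTokChain
    rw [pvTokB.eq_def]
    cases hfs : pvFirstSound c with
    | none => simp [hfs]
    | some s =>
      by_cases hp : s.isPrefixOf (c :: r)
      · obtain rfl : s = prev :=
          h s (pvFirstSound_mem hfs) (List.isPrefixOf_iff_prefix.mp hp)
        cases ht : pvTokB (r.drop (s.length - 1)) with
        | none => simp [hfs, List.isPrefixOf_iff_prefix.mp hp, ht]
        | some ts => simp [hfs, List.isPrefixOf_iff_prefix.mp hp, ht, pvChain]
      · have hp' : ¬ s <+: c :: r := fun hh => hp (List.isPrefixOf_iff_prefix.mpr hh)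
        simp [hfs, hp']

-- the fold never resets matched once true
theorem pvFoldA_matched (L : List (List Char)) (st : List Char × List Char × Bool)
    (h : st.2.2 = true) : (L.foldl pvStepA st).2.2 = true := by
  induction L generalizing st with
  | nil => exact h
  | cons s L ih =>
    refine ih (pvStepA st s) ?_
    unfold pvStepA
    split <;> simp_all

-- the remaining for-loop after a strip (matched = true) computes tokenize-then-chain
theorem pvInnerT (n : Nat)
    (IH : ∀ v, v.length ≤ n → ∀ p, pvGoA v p = pvTokChain v p)
    (L : List (List Char)) (hL : ∀ s ∈ L, s ∈ pvSounds) (w prev : List Char)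
    (hw : w.length ≤ n) :
    pvGoA (L.foldl pvStepA (w, prev, true)).1 (L.foldl pvStepA (w, prev, true)).2.1
      = pvTokChain w prev := by
  induction L generalizing w prev with
  | nil => exact IH w hw prev
  | cons s L ih =>
    by_cases hc : s <+: w ∧ s ≠ prev
    · have hfold : List.foldl pvStepA (w, prev, true) (s :: L)
          = List.foldl pvStepA (w.drop s.length, s, true) L := by
        simp [List.foldl, pvStepA, hc]
      rw [hfold]
      have hw' : (w.drop s.length).length ≤ n := by
        rw [List.length_drop]; omega
      rw [ih (fun x hx => hL x (by simp [hx])) (w.drop s.length) s hw']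
      exact (pvStripStep (hL s (by simp)) hc.1 hc.2).symm
    · have hfold : List.foldl pvStepA (w, prev, true) (s :: L)
          = List.foldl pvStepA (w, prev, true) L := by
        simp [List.foldl, pvStepA, hc]
      rw [hfold]
      exact ih (fun x hx => hL x (by simp [hx])) w prev hw

-- the full for-loop body (matched starts false) computes tokenize-then-chain
theorem pvInnerF (n : Nat)
    (IH : ∀ v, v.length ≤ n → ∀ p, pvGoA v p = pvTokChain v p)
    (L : List (List Char)) (hL : ∀ s ∈ L, s ∈ pvSounds) (w prev : List Char)
    (hw : w.length ≤ n + 1) (hne : w ≠ [])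
    (hrest : ∀ s ∈ pvSounds, s <+: w → s ≠ prev → s ∈ L) :
    (if (L.foldl pvStepA (w, prev, false)).2.2 = true
      then pvGoA (L.foldl pvStepA (w, prev, false)).1 (L.foldl pvStepA (w, prev, false)).2.1
      else false) = pvTokChain w prev := by
  induction L generalizing prev with
  | nil =>
    simp only [List.foldl]
    simp only [Bool.false_eq_true, if_false]
    refine (pvDeadEnd hne ?_).symm
    intro s hs hp
    by_contra hnp
    exact absurd (hrest s hs hp hnp) (by simp)
  | cons s L ih =>
    by_cases hc : s <+: w ∧ s ≠ prev
    · have hfold : List.foldl pvStepA (w, prev, false) (s :: L)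
          = List.foldl pvStepA (w.drop s.length, s, true) L := by
        simp [List.foldl, pvStepA, hc]
      rw [hfold]
      rw [if_pos (pvFoldA_matched L _ rfl)]
      have hslen : 1 ≤ s.length := by
        have := pvSounds_ne_nil (hL s (by simp))
        cases s with
        | nil => exact absurd rfl this
        | cons a t => simp
      have hw' : (w.drop s.length).length ≤ n := by
        rw [List.length_drop]
        have : 1 ≤ w.length := by
          cases w with
          | nil => exact absurd rfl hne
          | cons a t => simp
        omega
      rw [pvInnerT n IH L (fun x hx => hL x (by simp [hx])) (w.drop s.length) s hw']
      exact (pvStripStep (hL s (by simp)) hc.1 hc.2).symm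
    · have hfold : List.foldl pvStepA (w, prev, false) (s :: L)
          = List.foldl pvStepA (w, prev, false) L := by
        simp [List.foldl, pvStepA, hc]
      rw [hfold]
      refine ih (fun x hx => hL x (by simp [hx])) prev ?_
      intro x hx hxp hxne
      have := hrest x hx hxp hxne
      simp at this
      rcases this with rfl | h
      · exact absurd ⟨hxp, hxne⟩ hc
      · exact h

theorem pvMain : ∀ (n : Nat) (w : List Char), w.length ≤ n → ∀ prev,
    pvGoA w prev = pvTokChain w prev := by
  intro n
  induction n with
  | zero =>
    intro w hw prev
    have : w = [] := List.eq_nil_of_length_eq_zero (Nat.le_zero.mp hw)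
    subst this
    rw [pvGoA]
    simp [pvTokChain, pvTokB.eq_def, pvChain]
  | succ n ih =>
    intro w hw prev
    by_cases hne : w = []
    · subst hne
      rw [pvGoA]
      simp [pvTokChain, pvTokB.eq_def, pvChain]
    · rw [pvGoA]
      rw [if_neg hne]
      exact pvInnerF n ih pvSounds (fun s hs => hs) w prev hw hne
        (fun s hs _ _ => hs)

-- tokens produced by B's tokenizer are sounds (hence nonempty)
theorem pvTokB_mem {w : List Char} {ts : List (List Char)} (h : pvTokB w = some ts) :
    ∀ t ∈ ts, t ∈ pvSounds := by
  induction w using pvTokB.induct generalizing ts with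
  | case1 =>
    rw [pvTokB.eq_def] at h
    simp at h
    subst h
    simp
  | case2 c rest hfs =>
    rw [pvTokB.eq_def] at h
    simp [hfs] at h
  | case3 c rest s hfs hp ih =>
    rw [pvTokB.eq_def] at h
    simp only [hfs, hp, if_true, Option.map_eq_some_iff] at h
    obtain ⟨ts', hts', rfl⟩ := h
    intro t ht
    simp only [List.mem_cons] at ht
    rcases ht with rfl | ht
    · exact pvFirstSound_mem hfs
    · exact ih hts' t ht
  | case4 c rest s hfs hp =>
    rw [pvTokB.eq_def] at h
    simp [hfs, hp] at h

theorem pvBneComm (a b : List Char) : (a != b) = (b != a) := by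
  by_cases h : a = b
  · subst h; rfl
  · rw [bne_iff_ne.mpr h, bne_iff_ne.mpr (Ne.symm h)]

theorem pvAdjCons (ts : List (List Char)) (a : List Char) :
    pvAdjOK (a :: ts) = pvChain a ts := by
  induction ts generalizing a with
  | nil => simp [pvAdjOK, pvChain]
  | cons b r ih =>
    simp only [pvAdjOK, List.tail, List.zip, List.zipWith, List.all_cons] at *
    rw [pvChain, ← ih b, pvBneComm]

theorem pvChainNil {ts : List (List Char)} (h : ∀ t ∈ ts, t ≠ []) :
    pvChain [] ts = pvAdjOK ts := by
  cases ts with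
  | nil => simp [pvChain, pvAdjOK]
  | cons a r =>
    rw [pvChain, pvAdjCons]
    have : (a != ([] : List Char)) = true := by
      simp [bne_iff_ne]
      exact h a (by simp)
    rw [this, Bool.true_and]

theorem pvFinal (w : List Char) :
    pvTokChain w [] = (match pvTokB w with
      | none => false
      | some ts => pvAdjOK ts) := by
  cases h : pvTokB w with
  | none => simp [pvTokChain, h]
  | some ts =>
    simp [pvTokChain, h]
    exact pvChainNil (fun t ht => pvSounds_ne_nil (pvTokB_mem h t ht))

-- ===== VERDICT (by name: the statement is the Claim_ definition above) =====
theorem can_pronounce_spec : Claim_equal_can_pronounce := by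
  intro word _
  unfold Spec_can_pronounce can_pronounce can_pronounce_alt
  rw [pvMain word.toList.length word.toList (Nat.le_refl _) []]
  exact pvFinal word.toList
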